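-- pv_equiv track=rewrite | github.com/gabesenese/A.L.I.C.E | ai/conversation_summarizer.py | _extract_assistant_actions
-- ===== SOURCE A (Python) =====
-- from typing import Dict, List, Optional, Any, Tuple
--
-- def _extract_assistant_actions(turns: List[Dict]) -> List[str]:
--     """Extract key assistant actions and responses"""
--     actions = []
--
--     for turn in turns:
--         response = turn.get("assistant_response", "")
--         intent = turn.get("intent", "")
--
--         if intent:
--             actions.append(f"Handled {intent.replace('_', ' ')} request")
--         elif response and len(response) > 20:
--             # Extract first sentence as action summary
--             first_sentence = response.split('.')[0]
--             if len(first_sentence) > 100: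
--                 first_sentence = first_sentence[:97] + "..."
--             actions.append(first_sentence)
--
--     return actions[-5:]  # Last 5 actions
-- ===== SOURCE B (Python) =====
-- def _summarize_turn(turn):
--     intent = turn.get("intent", "")
--     if intent:
--         return "Handled " + intent.replace('_', ' ') + " request"
--     response = turn.get("assistant_response", "")
--     if response and len(response) > 20:
--         first = response.split('.')[0]
--         if len(first) > 100:
--             first = first[:97] + "..."
--         return first
--     return None
--
-- def _extract_assistant_actions(turns):
--     buf = []
--     for turn in reversed(turns):
--         s = _summarize_turn(turn)
--         if s is not None:
--             buf.append(s)
--             if len(buf) == 5: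
--                 break
--     buf.reverse()
--     return buf
-- ===== Notes on version B (the rewrite author's own statement) =====
-- stated objective: alternative
-- what changed: B walks the turns in reverse with a per-turn summarizer helper, collecting at most 5 summaries and breaking early, then reverses the buffer, instead of A's summarize-everything-then-slice-the-last-5.
import Mathlib
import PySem

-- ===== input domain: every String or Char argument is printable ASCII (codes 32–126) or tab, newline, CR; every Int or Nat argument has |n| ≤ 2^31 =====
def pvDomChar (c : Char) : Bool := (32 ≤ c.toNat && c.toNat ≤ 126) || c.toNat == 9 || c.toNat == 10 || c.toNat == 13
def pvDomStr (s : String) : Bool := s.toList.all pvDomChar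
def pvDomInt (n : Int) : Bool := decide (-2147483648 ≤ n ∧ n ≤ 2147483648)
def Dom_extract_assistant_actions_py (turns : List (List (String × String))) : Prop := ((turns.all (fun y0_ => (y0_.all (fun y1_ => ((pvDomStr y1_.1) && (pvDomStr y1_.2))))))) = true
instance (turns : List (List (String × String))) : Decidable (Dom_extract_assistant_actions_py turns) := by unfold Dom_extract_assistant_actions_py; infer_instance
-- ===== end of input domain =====

-- B summarizes turns in reverse with early exit after 5 actions (helper per turn), instead of summarizing all turns and slicing the last 5; objective: alternative decomposition.


-- ===== PORT A =====
def extract_assistant_actions_py (turns : List (List (String × String))) : List String :=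
  let actions := turns.foldl (fun actions turn =>
    let response := PySem.Dict.getD (PySem.Dict.mk turn) "assistant_response" ""
    let intent := PySem.Dict.getD (PySem.Dict.mk turn) "intent" ""
    if intent ≠ "" then
      actions ++ ["Handled " ++ PySem.Str.replace intent "_" " " ++ " request"]
    else if response ≠ "" ∧ PySem.Str.len response > 20 then
      -- response.split('.')[0]: split? with a nonempty sep is always 'some' of a nonempty list,
      -- so .getD [] and .headD "" are exact (index 0 never raises in Python here)
      let first_sentence := ((PySem.Str.split? response ".").getD []).headD ""
      let first_sentence :=
        if PySem.Str.len first_sentence > 100 then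
          PySem.Str.slice first_sentence none (some 97) ++ "..."
        else first_sentence
      actions ++ [first_sentence]
    else actions) []
  PySem.List.slice actions (some (-5)) none

-- ===== PORT B =====
def pvSummarizeTurn (turn : List (String × String)) : Option String :=
  let intent := PySem.Dict.getD (PySem.Dict.mk turn) "intent" ""
  if intent ≠ "" then
    some ("Handled " ++ PySem.Str.replace intent "_" " " ++ " request")
  else
    let response := PySem.Dict.getD (PySem.Dict.mk turn) "assistant_response" ""
    if response ≠ "" ∧ PySem.Str.len response > 20 then
      let first := ((PySem.Str.split? response ".").getD []).headD ""
      some (if PySem.Str.len first > 100 then PySem.Str.slice first none (some 97) ++ "..." else first)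
    else none

def pvAltLoop : List (List (String × String)) → List String → List String
  | [], buf => buf
  | t :: rest, buf =>
    match pvSummarizeTurn t with
    | some s =>
      let buf' := buf ++ [s]
      if buf'.length = 5 then buf' else pvAltLoop rest buf'
    | none => pvAltLoop rest buf

def extract_assistant_actions_py_alt (turns : List (List (String × String))) : List String :=
  (pvAltLoop turns.reverse []).reverse

-- ===== PRECONDITION & SPEC =====
def Spec_extract_assistant_actions_py (turns : List (List (String × String))) (out : List String) : Prop := out = extract_assistant_actions_py_alt turns
instance (turns : List (List (String × String))) (out : List String) : Decidable (Spec_extract_assistant_actions_py turns out) := by unfold Spec_extract_assistant_actions_py; infer_instance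

-- ===== CLAIM (what is proved, stated in full; the proofs are below) =====
def Claim_equal_extract_assistant_actions_py : Prop := ∀ (turns : List (List (String × String))), Dom_extract_assistant_actions_py turns → Spec_extract_assistant_actions_py turns (extract_assistant_actions_py turns)

-- ===== LEMMAS AND PROOFS =====

-- A's fold collects exactly the per-turn summaries
lemma pvFoldA_eq (l : List (List (String × String))) (acc : List String) :
    l.foldl (fun actions turn =>
      let response := PySem.Dict.getD (PySem.Dict.mk turn) "assistant_response" ""
      let intent := PySem.Dict.getD (PySem.Dict.mk turn) "intent" ""
      if intent ≠ "" then
        actions ++ ["Handled " ++ PySem.Str.replace intent "_" " " ++ " request"]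
      else if response ≠ "" ∧ PySem.Str.len response > 20 then
        let first_sentence := ((PySem.Str.split? response ".").getD []).headD ""
        let first_sentence :=
          if PySem.Str.len first_sentence > 100 then
            PySem.Str.slice first_sentence none (some 97) ++ "..."
          else first_sentence
        actions ++ [first_sentence]
      else actions) acc
    = acc ++ l.filterMap pvSummarizeTurn := by
  induction l generalizing acc with
  | nil => simp
  | cons t rest ih =>
    rw [List.foldl_cons, ih, List.filterMap_cons]
    unfold pvSummarizeTurn
    dsimp only
    split_ifs <;> simp

-- B's loop takes up to (5 - buf.length) further summaries
lemma pvAltLoop_eq (l : List (List (String × String))) (buf : List String)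
    (h : buf.length < 5) :
    pvAltLoop l buf = buf ++ (l.filterMap pvSummarizeTurn).take (5 - buf.length) := by
  induction l generalizing buf with
  | nil => simp [pvAltLoop]
  | cons t rest ih =>
    simp only [pvAltLoop, List.filterMap_cons]
    cases hs : pvSummarizeTurn t with
    | none => exact ih buf h
    | some s =>
      simp only []
      by_cases h5 : (buf ++ [s]).length = 5
      · simp only [h5, if_true]
        have hb4 : buf.length = 4 := by simp at h5; omega
        simp [hb4]
      · simp only [h5, if_false]
        have h5' : buf.length + 1 ≠ 5 := by simpa using h5
        rw [ih (buf ++ [s]) (by simp; omega)]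
        have h45 : 5 - buf.length = (5 - (buf ++ [s]).length) + 1 := by simp; omega
        rw [h45, List.take_succ_cons]
        simp

lemma pvLastFive (F : List String) :
    (F.reverse.take 5).reverse = F.drop (F.length - 5) := by
  rw [List.take_reverse]
  simp

-- ===== VERDICT (by name: the statement is the Claim_ definition above) =====
theorem extract_assistant_actions_py_spec : Claim_equal_extract_assistant_actions_py := by
  intro turns _
  unfold Spec_extract_assistant_actions_py extract_assistant_actions_py extract_assistant_actions_py_alt
  rw [pvFoldA_eq, pvAltLoop_eq _ _ (by simp)]
  rw [PySem.List.slice_from_neg_ofNat _ 5 (by norm_num)]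
  simp only [List.nil_append, List.filterMap_reverse, List.length_nil, Nat.sub_zero]
  exact (pvLastFive _).symm
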